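-- pv_equiv track=rewrite | github.com/shimo4228/contemplative-moltbook | src/contemplative_agent/adapters/moltbook/verification.py | _deobfuscate_word
-- ===== SOURCE A (Python) =====
-- def _deobfuscate_word(word: str) -> str:
--     """Deobfuscate a single word by detecting repetition factor."""
--     # Try pair-based decoding (factor 2): check if chars at even positions
--     # match chars at odd positions
--     if len(word) >= 2 and len(word) % 2 == 0:
--         is_paired = all(word[i] == word[i + 1] for i in range(0, len(word), 2))
--         if is_paired:
--             return word[::2]
--
--     # Try factor 3
--     if len(word) >= 3 and len(word) % 3 == 0:
--         is_tripled = all(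
--             word[i] == word[i + 1] == word[i + 2]
--             for i in range(0, len(word), 3)
--         )
--         if is_tripled:
--             return word[::3]
--
--     # Fallback: run-length collapse
--     result = [word[0]]
--     for i in range(1, len(word)):
--         if word[i] != word[i - 1]:
--             result.append(word[i])
--     return "".join(result)
-- ===== SOURCE B (Python) =====
-- def _deobfuscate_word(word: str) -> str:
--     # Run-length encode once, then decide the repetition factor from the run counts.
--     runs = []
--     prev = None
--     count = 0
--     for ch in word:
--         if ch == prev:
--             count += 1
--         else:
--             if count:
--                 runs.append((prev, count))
--             prev, count = ch, 1
--     if count: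
--         runs.append((prev, count))
--     if runs and all(k % 2 == 0 for _, k in runs):
--         return "".join(c * (k // 2) for c, k in runs)
--     if runs and all(k % 3 == 0 for _, k in runs):
--         return "".join(c * (k // 3) for c, k in runs)
--     return "".join(c for c, _ in runs)
-- ===== Notes on version B (the rewrite author's own statement) =====
-- stated objective: alternative
-- what changed: B builds the run-length encoding of the word in one pass and decides the repetition factor from the run counts (all counts even / divisible by 3), instead of A's separate index-stepping equality scans and step slices; the fallback collapse is just the run characters.
import Mathlib
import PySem

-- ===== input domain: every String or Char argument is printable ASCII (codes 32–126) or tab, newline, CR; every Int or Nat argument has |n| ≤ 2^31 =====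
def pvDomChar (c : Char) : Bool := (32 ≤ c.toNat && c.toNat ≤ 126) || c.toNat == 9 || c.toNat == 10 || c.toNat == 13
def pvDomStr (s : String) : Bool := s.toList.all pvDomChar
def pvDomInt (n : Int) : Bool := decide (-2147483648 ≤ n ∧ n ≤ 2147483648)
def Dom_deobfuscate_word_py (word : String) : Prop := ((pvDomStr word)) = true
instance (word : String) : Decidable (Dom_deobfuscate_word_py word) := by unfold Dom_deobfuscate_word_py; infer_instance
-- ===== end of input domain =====

-- B replaces A's index-stepping repetition scans and step slices by one run-length
-- encoding pass, deciding the factor from the run counts (alternative decomposition,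
-- same asymptotic cost).


-- ===== PORT A =====
def deobfuscate_word_py (word : String) : String :=
  let l := word.toList
  let n : Int := (l.length : Int)
  if (decide (2 ≤ n) && (PySem.Int.mod n 2 == 0))
      && (PySem.List.pyRange 0 n 2).all
           (fun i => PySem.List.pyGet? l i == PySem.List.pyGet? l (i + 1)) then
    String.ofList ((PySem.List.slice? l none none 2).getD [])
  else if (decide (3 ≤ n) && (PySem.Int.mod n 3 == 0))
      && (PySem.List.pyRange 0 n 3).all
           (fun i => (PySem.List.pyGet? l i == PySem.List.pyGet? l (i + 1))
                     && (PySem.List.pyGet? l (i + 1) == PySem.List.pyGet? l (i + 2))) then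
    String.ofList ((PySem.List.slice? l none none 3).getD [])
  else
    match PySem.List.pyGet? l 0 with
    | none => ""   -- Python raises IndexError (word[0]) here; excluded by Pre_
    | some c =>
      String.ofList ((PySem.List.pyRange 1 n 1).foldl
        (fun acc i =>
          if PySem.List.pyGetD l i c != PySem.List.pyGetD l (i - 1) c then
            acc ++ [PySem.List.pyGetD l i c]
          else acc) [c])

-- ===== PORT B =====
-- the run-length-encoding loop of Source B: state (runs, prev, count)
def pvRunStep (st : List (Char × Nat) × Option Char × Nat) (ch : Char) :
    List (Char × Nat) × Option Char × Nat :=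
  match st with
  | (runs, prev, count) =>
    if some ch == prev then (runs, prev, count + 1)
    else ((if count ≠ 0 then runs ++ [(prev.getD ch, count)] else runs), some ch, 1)

def deobfuscate_word_py_alt (word : String) : String :=
  let st := word.toList.foldl pvRunStep ([], none, 0)
  let runs := if st.2.2 ≠ 0 then st.1 ++ [(st.2.1.getD 'a', st.2.2)] else st.1
  if (!runs.isEmpty) && runs.all (fun p => p.2 % 2 == 0) then
    String.ofList (runs.flatMap (fun p => List.replicate (p.2 / 2) p.1))
  else if (!runs.isEmpty) && runs.all (fun p => p.2 % 3 == 0) then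
    String.ofList (runs.flatMap (fun p => List.replicate (p.2 / 3) p.1))
  else
    String.ofList (runs.map (fun p => p.1))

-- ===== PRECONDITION & SPEC =====
-- Pre_ excludes only the empty string, on which A raises IndexError (word[0] in the fallback).
def Pre_deobfuscate_word_py (word : String) : Prop := word ≠ ""
instance (word : String) : Decidable (Pre_deobfuscate_word_py word) := by
  unfold Pre_deobfuscate_word_py; infer_instance
def pvWitness_deobfuscate_word_py : String := "aabb"

def Spec_deobfuscate_word_py (word : String) (out : String) : Prop :=
  out = deobfuscate_word_py_alt word
instance (word : String) (out : String) : Decidable (Spec_deobfuscate_word_py word out) := by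
  unfold Spec_deobfuscate_word_py; infer_instance

-- ===== CLAIM (what is proved, stated in full; the proofs are below) =====
def Claim_equal_deobfuscate_word_py : Prop := ∀ (word : String), Dom_deobfuscate_word_py word → Pre_deobfuscate_word_py word → Spec_deobfuscate_word_py word (deobfuscate_word_py word)

-- ===== LEMMAS AND PROOFS =====

def pvRuns : Char → Nat → List Char → List (Char × Nat)
  | c, k, [] => [(c, k)]
  | c, k, d :: t => if d == c then pvRuns c (k + 1) t else (c, k) :: pvRuns d 1 t
def pvFlat (rs : List (Char × Nat)) : List Char :=
  rs.flatMap (fun p => List.replicate p.2 p.1)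
def pvGood (rs : List (Char × Nat)) : Prop :=
  rs.IsChain (fun p q => p.1 ≠ q.1) ∧ ∀ p ∈ rs, 0 < p.2

theorem pvFlat_runs (t : List Char) : ∀ c k, pvFlat (pvRuns c k t) = List.replicate k c ++ t := by
  induction t with
  | nil => intro c k; simp [pvRuns, pvFlat]
  | cons d t ih =>
    intro c k
    by_cases h : d = c
    · subst h
      simp only [pvRuns, beq_self_eq_true, if_true, ih]
      rw [List.replicate_succ']
      simp
    · simp only [pvRuns, beq_eq_false_iff_ne.mpr h, Bool.false_eq_true, if_false]
      simp only [pvFlat, List.flatMap_cons] at ih ⊢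
      rw [ih d 1]
      simp

theorem pvRuns_head (t : List Char) : ∀ (c : Char) (k : Nat),
    ∃ k' rest, pvRuns c k t = (c, k') :: rest ∧ k ≤ k' := by
  induction t with
  | nil => intro c k; exact ⟨k, [], rfl, le_refl _⟩
  | cons d t ih =>
    intro c k
    by_cases h : d = c
    · subst h
      obtain ⟨k', rest, he, hle⟩ := ih d (k + 1)
      exact ⟨k', rest, by simp [pvRuns, he], by omega⟩
    · exact ⟨k, pvRuns d 1 t, by simp [pvRuns, h], le_refl _⟩

theorem pvGood_runs (t : List Char) : ∀ c k, 0 < k → pvGood (pvRuns c k t) := by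
  induction t with
  | nil =>
    intro c k hk
    refine ⟨by simp [pvRuns], ?_⟩
    intro p hp
    simp [pvRuns] at hp
    simp [hp, hk]
  | cons d t ih =>
    intro c k hk
    by_cases h : d = c
    · subst h; simpa [pvRuns] using ih d (k + 1) (by omega)
    · obtain ⟨hch, hpos⟩ := ih d 1 (by omega)
      obtain ⟨k', rest, he, hle⟩ := pvRuns_head t d 1
      refine ⟨?_, ?_⟩
      · simp only [pvRuns, beq_eq_false_iff_ne.mpr h, Bool.false_eq_true, if_false]
        rw [he] at hch ⊢
        exact List.IsChain.cons_cons (by simpa using (Ne.symm h)) hch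
      · intro p hp
        simp only [pvRuns, beq_eq_false_iff_ne.mpr h, Bool.false_eq_true, if_false, List.mem_cons] at hp
        rcases hp with h1 | h2
        · subst h1; exact hk
        · exact hpos p h2

theorem pvRuns_ne_nil (t : List Char) (c : Char) (k : Nat) : pvRuns c k t ≠ [] := by
  obtain ⟨k', rest, he, _⟩ := pvRuns_head t c k
  simp [he]

theorem pvFoldl_runs (t : List Char) : ∀ rs c k, 0 < k →
    (let st := t.foldl pvRunStep (rs, some c, k);
     if st.2.2 ≠ 0 then st.1 ++ [(st.2.1.getD 'a', st.2.2)] else st.1) = rs ++ pvRuns c k t := by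
  induction t with
  | nil => intro rs c k hk; simp [pvRuns, Nat.pos_iff_ne_zero.mp hk]
  | cons ch t ih =>
    intro rs c k hk
    by_cases h : ch = c
    · subst h
      simpa [pvRunStep, pvRuns] using ih rs ch (k + 1) (by omega)
    · have : pvRunStep (rs, some c, k) ch = (rs ++ [(c, k)], some ch, 1) := by
        simp [pvRunStep, h, Nat.pos_iff_ne_zero.mp hk]
      simp only [List.foldl_cons, this]
      rw [ih (rs ++ [(c, k)]) ch 1 (by omega)]
      simp [pvRuns, h]

def pvPaired : List Char → Bool
  | [] => true
  | [_] => false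
  | a :: b :: t => (a == b) && pvPaired t
def pvTripled : List Char → Bool
  | [] => true
  | [_] => false
  | [_, _] => false
  | a :: b :: c :: t => (a == b) && ((b == c) && pvTripled t)

def pvEveryOther : List Char → List Char
  | [] => []
  | [a] => [a]
  | a :: _ :: t => a :: pvEveryOther t
def pvEveryThird : List Char → List Char
  | [] => []
  | [a] => [a]
  | [a, _] => [a]
  | a :: _ :: _ :: t => a :: pvEveryThird t

theorem pvPaired_replicate (k : Nat) (c : Char) (t : List Char)
    (h : ∀ d ∈ t.head?, d ≠ c) :
    pvPaired (List.replicate k c ++ t) = (decide (k % 2 = 0) && pvPaired t) := by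
  induction k using Nat.strong_induction_on with
  | _ k ih =>
    match k with
    | 0 => simp
    | 1 =>
      cases t with
      | nil => simp [pvPaired]
      | cons d t' =>
        have hd : d ≠ c := h d (by simp)
        simp [pvPaired, beq_eq_false_iff_ne.mpr (fun he => hd he.symm)]
    | (m + 2) =>
      rw [List.replicate_succ, List.replicate_succ]
      simp only [List.cons_append, pvPaired, beq_self_eq_true, Bool.true_and]
      rw [ih m (by omega)]
      congr 1
      simp [Nat.add_mod_right]
theorem pvTripled_replicate (k : Nat) (c : Char) (t : List Char)
    (h : ∀ d ∈ t.head?, d ≠ c) :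
    pvTripled (List.replicate k c ++ t) = (decide (k % 3 = 0) && pvTripled t) := by
  induction k using Nat.strong_induction_on with
  | _ k ih =>
    match k with
    | 0 => simp
    | 1 =>
      cases t with
      | nil => simp [pvTripled]
      | cons d t' =>
        have hd : (c == d) = false := beq_eq_false_iff_ne.mpr (fun he => (h d (by simp)) he.symm)
        cases t' with
        | nil => simp [pvTripled]
        | cons e t'' => simp [pvTripled, hd]
    | 2 =>
      cases t with
      | nil => simp [pvTripled]
      | cons d t' =>
        have hd : (c == d) = false := beq_eq_false_iff_ne.mpr (fun he => (h d (by simp)) he.symm)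
        simp [pvTripled, hd]
    | (m + 3) =>
      rw [List.replicate_succ, List.replicate_succ, List.replicate_succ]
      simp only [List.cons_append, pvTripled, beq_self_eq_true, Bool.true_and]
      rw [ih m (by omega)]
      congr 1
      simp [Nat.add_mod_right]
theorem pvFlat_head (rs : List (Char × Nat)) (h : ∀ p ∈ rs, 0 < p.2) :
    ∀ d ∈ (pvFlat rs).head?, ∃ k rest, rs = (d, k) :: rest := by
  intro d hd
  cases rs with
  | nil => simp [pvFlat] at hd
  | cons p rs' =>
    have hp : 0 < p.2 := h p (by simp)
    obtain ⟨m, hm⟩ : ∃ m, p.2 = m + 1 := ⟨p.2 - 1, by omega⟩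
    simp [pvFlat, hm, List.replicate_succ] at hd
    exact ⟨p.2, rs', by rw [← hd]⟩
theorem pvPaired_flat (rs : List (Char × Nat)) (h : pvGood rs) :
    pvPaired (pvFlat rs) = rs.all (fun p => p.2 % 2 == 0) := by
  induction rs with
  | nil => simp [pvFlat, pvPaired]
  | cons p rs' ih =>
    obtain ⟨hch, hpos⟩ := h
    have hgood' : pvGood rs' := ⟨hch.tail, fun q hq => hpos q (by simp [hq])⟩
    have hhead : ∀ d ∈ (pvFlat rs').head?, d ≠ p.1 := by
      intro d hd he
      obtain ⟨k, rest, hrs⟩ := pvFlat_head rs' hgood'.2 d hd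
      rw [hrs] at hch
      have := List.IsChain.rel_head hch
      simp [he] at this
    have : pvFlat (p :: rs') = List.replicate p.2 p.1 ++ pvFlat rs' := by simp [pvFlat]
    rw [this, pvPaired_replicate p.2 p.1 _ hhead, ih hgood']
    cases h2 : (p.2 % 2 == 0) <;> simp_all
theorem pvTripled_flat (rs : List (Char × Nat)) (h : pvGood rs) :
    pvTripled (pvFlat rs) = rs.all (fun p => p.2 % 3 == 0) := by
  induction rs with
  | nil => simp [pvFlat, pvTripled]
  | cons p rs' ih =>
    obtain ⟨hch, hpos⟩ := h
    have hgood' : pvGood rs' := ⟨hch.tail, fun q hq => hpos q (by simp [hq])⟩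
    have hhead : ∀ d ∈ (pvFlat rs').head?, d ≠ p.1 := by
      intro d hd he
      obtain ⟨k, rest, hrs⟩ := pvFlat_head rs' hgood'.2 d hd
      rw [hrs] at hch
      have := List.IsChain.rel_head hch
      simp [he] at this
    have : pvFlat (p :: rs') = List.replicate p.2 p.1 ++ pvFlat rs' := by simp [pvFlat]
    rw [this, pvTripled_replicate p.2 p.1 _ hhead, ih hgood']
    cases h2 : (p.2 % 3 == 0) <;> simp_all
theorem pvPaired_length (l : List Char) (h : pvPaired l = true) : l.length % 2 = 0 := by
  induction l using pvPaired.induct with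
  | case1 => simp
  | case2 a => simp [pvPaired] at h
  | case3 a b t ih =>
    simp only [pvPaired, Bool.and_eq_true] at h
    have := ih h.2
    simp [List.length_cons]
    omega
theorem pvTripled_length (l : List Char) (h : pvTripled l = true) : l.length % 3 = 0 := by
  induction l using pvTripled.induct with
  | case1 => simp
  | case2 a => simp [pvTripled] at h
  | case3 a b => simp [pvTripled] at h
  | case4 a b c t ih =>
    simp only [pvTripled, Bool.and_eq_true] at h
    have := ih h.2.2
    simp [List.length_cons]
    omega
theorem pvEveryOther_replicate (k : Nat) (c : Char) (t : List Char) (h : k % 2 = 0) :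
    pvEveryOther (List.replicate k c ++ t) = List.replicate (k / 2) c ++ pvEveryOther t := by
  induction k using Nat.strong_induction_on with
  | _ k ih =>
    match k with
    | 0 => simp
    | 1 => omega
    | (m + 2) =>
      rw [List.replicate_succ, List.replicate_succ]
      simp only [List.cons_append, pvEveryOther]
      rw [ih m (by omega) (by omega)]
      have : (m + 2) / 2 = m / 2 + 1 := by omega
      rw [this, List.replicate_succ]
      simp
theorem pvEveryThird_replicate (k : Nat) (c : Char) (t : List Char) (h : k % 3 = 0) :
    pvEveryThird (List.replicate k c ++ t) = List.replicate (k / 3) c ++ pvEveryThird t := by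
  induction k using Nat.strong_induction_on with
  | _ k ih =>
    match k with
    | 0 => simp
    | 1 => omega
    | 2 => omega
    | (m + 3) =>
      rw [List.replicate_succ, List.replicate_succ, List.replicate_succ]
      simp only [List.cons_append, pvEveryThird]
      rw [ih m (by omega) (by omega)]
      have : (m + 3) / 3 = m / 3 + 1 := by omega
      rw [this, List.replicate_succ]
      simp
theorem pvEveryOther_flat (rs : List (Char × Nat)) (h : rs.all (fun p => p.2 % 2 == 0) = true) :
    pvEveryOther (pvFlat rs) = rs.flatMap (fun p => List.replicate (p.2 / 2) p.1) := by
  induction rs with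
  | nil => simp [pvFlat, pvEveryOther]
  | cons p rs' ih =>
    simp only [List.all_cons, Bool.and_eq_true, beq_iff_eq] at h
    have : pvFlat (p :: rs') = List.replicate p.2 p.1 ++ pvFlat rs' := by simp [pvFlat]
    rw [this, pvEveryOther_replicate p.2 p.1 _ h.1, ih h.2]
    simp
theorem pvEveryThird_flat (rs : List (Char × Nat)) (h : rs.all (fun p => p.2 % 3 == 0) = true) :
    pvEveryThird (pvFlat rs) = rs.flatMap (fun p => List.replicate (p.2 / 3) p.1) := by
  induction rs with
  | nil => simp [pvFlat, pvEveryThird]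
  | cons p rs' ih =>
    simp only [List.all_cons, Bool.and_eq_true, beq_iff_eq] at h
    have : pvFlat (p :: rs') = List.replicate p.2 p.1 ++ pvFlat rs' := by simp [pvFlat]
    rw [this, pvEveryThird_replicate p.2 p.1 _ h.1, ih h.2]
    simp

theorem pvSlice2_closed (l : List Char) :
    PySem.List.slice? l none none 2 =
      some ((List.range ((l.length + 1) / 2)).filterMap (fun k => l[2 * k]?)) := by
  simp only [PySem.List.slice?, PySem.List.sliceIndices]
  norm_num
  have hcount : (if 0 < l.length then (((l.length : Int) + 2 - 1) / 2).toNat else 0)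
      = (l.length + 1) / 2 := by
    by_cases h : 0 < l.length
    · rw [if_pos h]
      omega
    · rw [if_neg h]
      omega
  norm_num at hcount
  rw [hcount]
  apply List.filterMap_congr
  intro x hx
  congr 1

theorem pvSlice3_closed (l : List Char) :
    PySem.List.slice? l none none 3 =
      some ((List.range ((l.length + 2) / 3)).filterMap (fun k => l[3 * k]?)) := by
  simp only [PySem.List.slice?, PySem.List.sliceIndices]
  norm_num
  have hcount : (if 0 < l.length then (((l.length : Int) + 3 - 1) / 3).toNat else 0)
      = (l.length + 2) / 3 := by
    by_cases h : 0 < l.length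
    · rw [if_pos h]
      omega
    · rw [if_neg h]
      omega
  norm_num at hcount
  rw [hcount]
  apply List.filterMap_congr
  intro x hx
  congr 1


theorem pvFilterMap2 (l : List Char) :
    (List.range ((l.length + 1) / 2)).filterMap (fun k => l[2 * k]?) = pvEveryOther l := by
  induction l using pvEveryOther.induct with
  | case1 => simp [pvEveryOther]
  | case2 a => simp [pvEveryOther]
  | case3 a b t ih =>
    have hc : ((a :: b :: t).length + 1) / 2 = (t.length + 1) / 2 + 1 := by
      simp [List.length_cons]; omega
    rw [hc, List.range_succ_eq_map, List.filterMap_cons, List.filterMap_map]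
    simp only [List.getElem?_cons_zero, Nat.mul_zero]
    rw [pvEveryOther]
    congr 1

theorem pvFilterMap3 (l : List Char) :
    (List.range ((l.length + 2) / 3)).filterMap (fun k => l[3 * k]?) = pvEveryThird l := by
  induction l using pvEveryThird.induct with
  | case1 => simp [pvEveryThird]
  | case2 a => simp [pvEveryThird]
  | case3 a b => simp [pvEveryThird, List.range_succ]
  | case4 a b c t ih =>
    have hc : ((a :: b :: c :: t).length + 2) / 3 = (t.length + 2) / 3 + 1 := by
      simp [List.length_cons]; omega
    rw [hc, List.range_succ_eq_map, List.filterMap_cons, List.filterMap_map]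
    simp only [List.getElem?_cons_zero, Nat.mul_zero]
    rw [pvEveryThird]
    congr 1



theorem pvAll2 (l : List Char) :
    (List.range ((l.length + 1) / 2)).all (fun k => l[2 * k]? == l[2 * k + 1]?) = pvPaired l := by
  induction l using pvPaired.induct with
  | case1 => simp [pvPaired]
  | case2 a => simp [pvPaired]
  | case3 a b t ih =>
    have hc : ((a :: b :: t).length + 1) / 2 = (t.length + 1) / 2 + 1 := by
      simp [List.length_cons]; omega
    have htail : (List.range ((t.length + 1) / 2)).all
        ((fun k => (a :: b :: t)[2 * k]? == (a :: b :: t)[2 * k + 1]?) ∘ Nat.succ) = pvPaired t := by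
      rw [← ih]
      refine List.all_congr rfl ?_
      intro x
      show ((a :: b :: t)[2 * (x + 1)]? == (a :: b :: t)[2 * (x + 1) + 1]?) = (t[2 * x]? == t[2 * x + 1]?)
      have e1 : (a :: b :: t)[2 * (x + 1)]? = t[2 * x]? := by
        have h : 2 * (x + 1) = (2 * x + 1) + 1 := by ring
        rw [h, List.getElem?_cons_succ, List.getElem?_cons_succ]
      have e2 : (a :: b :: t)[2 * (x + 1) + 1]? = t[2 * x + 1]? := by
        have h : 2 * (x + 1) + 1 = ((2 * x + 1) + 1) + 1 := by ring
        rw [h, List.getElem?_cons_succ, List.getElem?_cons_succ]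
      rw [e1, e2]
    rw [hc, List.range_succ_eq_map, List.all_cons, List.all_map, htail, pvPaired]
    simp

theorem pvAll3 (l : List Char) :
    (List.range ((l.length + 2) / 3)).all
      (fun k => (l[3 * k]? == l[3 * k + 1]?) && (l[3 * k + 1]? == l[3 * k + 2]?)) = pvTripled l := by
  induction l using pvTripled.induct with
  | case1 => simp [pvTripled]
  | case2 a => simp [pvTripled, List.range_succ]
  | case3 a b => simp [pvTripled, List.range_succ]
  | case4 a b c t ih =>
    have hc : ((a :: b :: c :: t).length + 2) / 3 = (t.length + 2) / 3 + 1 := by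
      simp [List.length_cons]; omega
    have htail : (List.range ((t.length + 2) / 3)).all
        ((fun k => ((a :: b :: c :: t)[3 * k]? == (a :: b :: c :: t)[3 * k + 1]?)
                   && ((a :: b :: c :: t)[3 * k + 1]? == (a :: b :: c :: t)[3 * k + 2]?)) ∘ Nat.succ)
        = pvTripled t := by
      rw [← ih]
      refine List.all_congr rfl ?_
      intro x
      show (((a :: b :: c :: t)[3 * (x + 1)]? == (a :: b :: c :: t)[3 * (x + 1) + 1]?)
            && ((a :: b :: c :: t)[3 * (x + 1) + 1]? == (a :: b :: c :: t)[3 * (x + 1) + 2]?))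
          = ((t[3 * x]? == t[3 * x + 1]?) && (t[3 * x + 1]? == t[3 * x + 2]?))
      have e1 : (a :: b :: c :: t)[3 * (x + 1)]? = t[3 * x]? := by
        have h : 3 * (x + 1) = (((3 * x) + 1) + 1) + 1 := by ring
        rw [h, List.getElem?_cons_succ, List.getElem?_cons_succ, List.getElem?_cons_succ]
      have e2 : (a :: b :: c :: t)[3 * (x + 1) + 1]? = t[3 * x + 1]? := by
        have h : 3 * (x + 1) + 1 = (((3 * x + 1) + 1) + 1) + 1 := by ring
        rw [h, List.getElem?_cons_succ, List.getElem?_cons_succ, List.getElem?_cons_succ]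
      have e3 : (a :: b :: c :: t)[3 * (x + 1) + 2]? = t[3 * x + 2]? := by
        have h : 3 * (x + 1) + 2 = (((3 * x + 2) + 1) + 1) + 1 := by ring
        rw [h, List.getElem?_cons_succ, List.getElem?_cons_succ, List.getElem?_cons_succ]
      rw [e1, e2, e3]
    rw [hc, List.range_succ_eq_map, List.all_cons, List.all_map, htail, pvTripled]
    simp [Bool.and_assoc]

def pvCollapse : Char → List Char → List Char
  | _, [] => []
  | prev, d :: t => if d ≠ prev then d :: pvCollapse d t else pvCollapse prev t

theorem pvBridge2 (l : List Char) :
    (PySem.List.pyRange 0 (l.length : Int) 2).all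
      (fun i => PySem.List.pyGet? l i == PySem.List.pyGet? l (i + 1)) =
    (List.range ((l.length + 1) / 2)).all (fun k => l[2 * k]? == l[2 * k + 1]?) := by
  rw [PySem.List.pyRange_of_pos 0 (l.length : Int) (by norm_num : (0:Int) < 2), List.all_map]
  have hc : (if (0:Int) < (l.length : Int) then (((l.length : Int) - 0 + 2 - 1) / 2).toNat else 0)
      = (l.length + 1) / 2 := by
    by_cases h : (0:Int) < (l.length : Int)
    · rw [if_pos h]; omega
    · rw [if_neg h]; omega
  rw [hc]
  refine List.all_congr rfl ?_
  intro k
  show (PySem.List.pyGet? l (0 + 2 * (k:Int)) == PySem.List.pyGet? l (0 + 2 * (k:Int) + 1))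
      = (l[2 * k]? == l[2 * k + 1]?)
  have h1 : (0 + 2 * (k:Int)) = ((2 * k : Nat) : Int) := by push_cast; ring
  have h2 : ((2 * k : Nat) : Int) + 1 = ((2 * k + 1 : Nat) : Int) := by push_cast; ring
  rw [h1, h2, PySem.List.pyGet?_natCast, PySem.List.pyGet?_natCast]

theorem pvBridge3 (l : List Char) :
    (PySem.List.pyRange 0 (l.length : Int) 3).all
      (fun i => (PySem.List.pyGet? l i == PySem.List.pyGet? l (i + 1))
                && (PySem.List.pyGet? l (i + 1) == PySem.List.pyGet? l (i + 2))) =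
    (List.range ((l.length + 2) / 3)).all
      (fun k => (l[3 * k]? == l[3 * k + 1]?) && (l[3 * k + 1]? == l[3 * k + 2]?)) := by
  rw [PySem.List.pyRange_of_pos 0 (l.length : Int) (by norm_num : (0:Int) < 3), List.all_map]
  have hc : (if (0:Int) < (l.length : Int) then (((l.length : Int) - 0 + 3 - 1) / 3).toNat else 0)
      = (l.length + 2) / 3 := by
    by_cases h : (0:Int) < (l.length : Int)
    · rw [if_pos h]; omega
    · rw [if_neg h]; omega
  rw [hc]
  refine List.all_congr rfl ?_
  intro k
  show ((PySem.List.pyGet? l (0 + 3 * (k:Int)) == PySem.List.pyGet? l (0 + 3 * (k:Int) + 1))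
        && (PySem.List.pyGet? l (0 + 3 * (k:Int) + 1) == PySem.List.pyGet? l (0 + 3 * (k:Int) + 2)))
      = ((l[3 * k]? == l[3 * k + 1]?) && (l[3 * k + 1]? == l[3 * k + 2]?))
  have h1 : (0 + 3 * (k:Int)) = ((3 * k : Nat) : Int) := by push_cast; ring
  have h2 : ((3 * k : Nat) : Int) + 1 = ((3 * k + 1 : Nat) : Int) := by push_cast; ring
  have h3 : ((3 * k : Nat) : Int) + 2 = ((3 * k + 2 : Nat) : Int) := by push_cast; ring
  rw [h1, h2, h3, PySem.List.pyGet?_natCast, PySem.List.pyGet?_natCast, PySem.List.pyGet?_natCast]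

theorem pvFallbackGen (l : List Char) (c : Char) :
    ∀ (dlt j : Nat) (acc : List Char), j + dlt = l.length → 1 ≤ j →
    (PySem.List.pyRange (j : Int) (l.length : Int) 1).foldl
      (fun acc i =>
        if PySem.List.pyGetD l i c != PySem.List.pyGetD l (i - 1) c then
          acc ++ [PySem.List.pyGetD l i c]
        else acc) acc
    = acc ++ pvCollapse (l.getD (j - 1) c) (l.drop j) := by
  intro dlt
  induction dlt with
  | zero =>
    intro j acc hj h1
    have : j = l.length := by omega
    subst this
    rw [PySem.List.pyRange_one_eq_nil (le_refl _), List.foldl_nil, List.drop_length]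
    simp [pvCollapse]
  | succ d ih =>
    intro j acc hj h1
    have hjl : j < l.length := by omega
    rw [PySem.List.pyRange_one_cons (by exact_mod_cast hjl), List.foldl_cons]
    have hgj : PySem.List.pyGetD l (j : Int) c = l.getD j c := by
      simp [PySem.List.pyGetD_natCast]
    have hgj1 : PySem.List.pyGetD l ((j : Int) - 1) c = l.getD (j - 1) c := by
      have : ((j : Int) - 1) = ((j - 1 : Nat) : Int) := by omega
      rw [this]
      simp [PySem.List.pyGetD_natCast]
    have hcast : ((j : Int) + 1) = ((j + 1 : Nat) : Int) := by push_cast; ring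
    have hdrop : l.drop j = l[j] :: l.drop (j + 1) := List.drop_eq_getElem_cons hjl
    have hget : l.getD j c = l[j] := List.getD_eq_getElem l c hjl
    by_cases hne : l.getD j c = l.getD (j - 1) c
    · have hb : (PySem.List.pyGetD l (j : Int) c != PySem.List.pyGetD l ((j : Int) - 1) c) = false := by
        rw [hgj, hgj1]
        exact bne_eq_false_iff_eq.mpr hne
      rw [hb]
      simp only [Bool.false_eq_true, if_false]
      rw [hcast, ih (j + 1) acc (by omega) (by omega)]
      congr 1
      have : (j + 1 - 1) = j := by omega
      rw [this, hdrop, pvCollapse]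
      rw [← hget, hne]
      simp
    · have hb : (PySem.List.pyGetD l (j : Int) c != PySem.List.pyGetD l ((j : Int) - 1) c) = true := by
        rw [hgj, hgj1]
        exact bne_iff_ne.mpr hne
      rw [hb]
      simp only [if_true]
      rw [hcast, ih (j + 1) (acc ++ [PySem.List.pyGetD l (j : Int) c]) (by omega) (by omega)]
      have : (j + 1 - 1) = j := by omega
      rw [this, List.append_assoc]
      congr 1
      rw [hdrop, pvCollapse]
      rw [← hget]
      simp only [if_pos (by simpa using hne : l.getD j c ≠ l.getD (j - 1) c)]
      simp [hgj]

theorem pvMapFst_runs (t : List Char) : ∀ c k, (pvRuns c k t).map (fun p => p.1) = c :: pvCollapse c t := by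
  induction t with
  | nil => intro c k; simp [pvRuns, pvCollapse]
  | cons d t ih =>
    intro c k
    by_cases h : d = c
    · subst h
      rw [pvCollapse, if_neg (by simp)]
      simpa [pvRuns] using ih d (k + 1)
    · simp only [pvRuns, beq_eq_false_iff_ne.mpr h, Bool.false_eq_true, if_false, List.map_cons]
      rw [ih d 1, pvCollapse, if_pos h]

-- A's two scan conditions, reduced to the recursive views
theorem pvPairedA (l : List Char) :
    (PySem.List.pyRange 0 (l.length : Int) 2).all
      (fun i => PySem.List.pyGet? l i == PySem.List.pyGet? l (i + 1)) = pvPaired l :=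
  (pvBridge2 l).trans (pvAll2 l)

theorem pvTripledA (l : List Char) :
    (PySem.List.pyRange 0 (l.length : Int) 3).all
      (fun i => (PySem.List.pyGet? l i == PySem.List.pyGet? l (i + 1))
                && (PySem.List.pyGet? l (i + 1) == PySem.List.pyGet? l (i + 2))) = pvTripled l :=
  (pvBridge3 l).trans (pvAll3 l)

theorem pvSlice2 (l : List Char) :
    PySem.List.slice? l none none 2 = some (pvEveryOther l) := by
  rw [pvSlice2_closed, pvFilterMap2]

theorem pvSlice3 (l : List Char) :
    PySem.List.slice? l none none 3 = some (pvEveryThird l) := by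
  rw [pvSlice3_closed, pvFilterMap3]

-- ===== VERDICT (by name: the statement is the Claim_ definition above) =====
-- assembling lemma on lists
theorem pvMain (c : Char) (t : List Char) :
    deobfuscate_word_py (String.ofList (c :: t)) = deobfuscate_word_py_alt (String.ofList (c :: t)) := by
  have hct : (String.ofList (c :: t)).toList = c :: t := by simp
  unfold deobfuscate_word_py deobfuscate_word_py_alt
  simp only [hct]
  rw [pvPairedA (c :: t), pvTripledA (c :: t), pvSlice2 (c :: t), pvSlice3 (c :: t)]
  rw [List.foldl_cons]
  have hstep0 : pvRunStep ([], none, 0) c = ([], some c, 1) := by simp [pvRunStep]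
  rw [hstep0]
  have hruns := pvFoldl_runs t [] c 1 (by omega)
  simp only at hruns
  rw [hruns]
  simp only [List.nil_append]
  have hflat : pvFlat (pvRuns c 1 t) = c :: t := by rw [pvFlat_runs]; simp
  have hgood := pvGood_runs t c 1 (by omega)
  have hnn := pvRuns_ne_nil t c 1
  have hEmp : (pvRuns c 1 t).isEmpty = false := by
    simp [hnn]
  have hP2 : pvPaired (c :: t) = (pvRuns c 1 t).all (fun p => p.2 % 2 == 0) := by
    rw [← hflat]; exact pvPaired_flat _ hgood
  have hP3 : pvTripled (c :: t) = (pvRuns c 1 t).all (fun p => p.2 % 3 == 0) := by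
    rw [← hflat]; exact pvTripled_flat _ hgood
  rw [hP2, hP3, hEmp]
  simp only [Bool.not_false, Bool.true_and, Option.getD_some]
  by_cases h2 : (pvRuns c 1 t).all (fun p => p.2 % 2 == 0) = true
  · have hplen : (c :: t).length % 2 = 0 := pvPaired_length _ (by rw [hP2]; exact h2)
    have hge : (2:Int) ≤ ((c :: t).length : Int) := by
      simp only [List.length_cons] at hplen ⊢
      omega
    have hmod : PySem.Int.mod ((c :: t).length : Int) 2 = 0 := by
      rw [PySem.Int.mod_eq_emod_of_pos (by norm_num)]
      omega
    rw [h2, hmod]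
    simp only [decide_eq_true hge, beq_self_eq_true, Bool.and_true, if_true]

    congr 1
    rw [← hflat, pvEveryOther_flat _ h2]
  · have h2f : (pvRuns c 1 t).all (fun p => p.2 % 2 == 0) = false := eq_false_of_ne_true h2
    rw [h2f]
    simp only [Bool.and_false, Bool.false_eq_true, if_false]
    by_cases h3 : (pvRuns c 1 t).all (fun p => p.2 % 3 == 0) = true
    · have hplen : (c :: t).length % 3 = 0 := pvTripled_length _ (by rw [hP3]; exact h3)
      have hge : (3:Int) ≤ ((c :: t).length : Int) := by
        simp only [List.length_cons] at hplen ⊢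
        omega
      have hmod : PySem.Int.mod ((c :: t).length : Int) 3 = 0 := by
        rw [PySem.Int.mod_eq_emod_of_pos (by norm_num)]
        omega
      rw [h3, hmod]
      simp only [decide_eq_true hge, beq_self_eq_true, Bool.and_true, if_true]

      congr 1
      rw [← hflat, pvEveryThird_flat _ h3]
    · have h3f : (pvRuns c 1 t).all (fun p => p.2 % 3 == 0) = false := eq_false_of_ne_true h3
      rw [h3f]
      simp only [Bool.and_false, Bool.false_eq_true, if_false]
      have hget0 : PySem.List.pyGet? (c :: t) (0 : Int) = some c := by
        simp [PySem.List.pyGet?, PySem.List.pyIdx?]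
      rw [hget0]
      have hfb := pvFallbackGen (c :: t) c t.length 1 [c] (by simp only [List.length_cons]; omega) (le_refl 1)
      simp only [Nat.cast_one] at hfb
      show String.ofList
          (List.foldl
            (fun acc i =>
              if (PySem.List.pyGetD (c :: t) i c != PySem.List.pyGetD (c :: t) (i - 1) c) = true then
                acc ++ [PySem.List.pyGetD (c :: t) i c]
              else acc)
            [c] (PySem.List.pyRange 1 ((c :: t).length : Int) 1)) =
        String.ofList (List.map (fun p => p.1) (pvRuns c 1 t))
      rw [hfb, pvMapFst_runs t c 1]
      simp

theorem deobfuscate_word_py_spec : Claim_equal_deobfuscate_word_py := by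
  unfold Claim_equal_deobfuscate_word_py
  intro word hdom hpre
  unfold Spec_deobfuscate_word_py
  obtain ⟨c, t, hct⟩ : ∃ c t, word.toList = c :: t := by
    cases hw : word.toList with
    | nil =>
      exfalso
      apply hpre
      have := congrArg String.ofList hw
      simpa using this
    | cons c t => exact ⟨c, t, rfl⟩
  have hw : word = String.ofList (c :: t) := by
    have := congrArg String.ofList hct
    simpa using this
  rw [hw]
  exact pvMain c t
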